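-- pv_equiv track=rewrite | github.com/Jonathan-124/Google-Foobar | (3-1) Queue to Do/solution.py | solution
-- ===== SOURCE A (Python) =====
-- def solution(start, length):
--     # s - Current start of line (inclusive)
--     # length - Length of line
--     # end_of_inspection - where the current line's inspection ends (inclusive)
--     s = start
--     check_sum = 0
--     end_of_inspection = s + length - 1
--
--     # Returns xor of the integer series [0, n]; also works for n = -1 (returns 0)
--     def get_xor_from_0(n):
--         rem = n % 4
--         if rem == 0:
--             return n
--         elif rem == 1:
--             return 1
--         elif rem == 2:
--             return n + 1
--         else:
--             return 0
--
--     while s <= end_of_inspection: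
--         if s > 2000000000:
--             # Exit when start of line is greater than max ID
--             break
--         else:
--             if end_of_inspection <= 2000000000:
--                 check_sum ^= get_xor_from_0(s - 1) ^ get_xor_from_0(end_of_inspection)
--                 s += length
--                 end_of_inspection += length - 1
--             else:
--                 check_sum ^= get_xor_from_0(s - 1) ^ get_xor_from_0(2000000000)
--                 break
--     return check_sum
-- ===== SOURCE B (Python) =====
-- CAP = 2000000000
--
--
-- def _xor_range(a, b):
--     # XOR of all integers in [a, b] (a <= b), without a prefix function:
--     # aligned pairs (2k, 2k+1) each XOR to 1, so only the unpaired ends and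
--     # the parity of the number of full pairs survive.
--     acc = 0
--     if a % 2 == 1:
--         acc ^= a
--         a += 1
--     if b % 2 == 0:
--         acc ^= b
--         b -= 1
--     if a <= b and ((b + 1 - a) // 2) % 2 == 1:
--         acc ^= 1
--     return acc
--
--
-- def solution(start, length):
--     # Instead of XORing each row of the staircase separately, XOR the whole
--     # contiguous span [start, hull_end] once and cancel the skipped ids (the
--     # gaps between consecutive rows) back out, using x ^ x = 0.
--     s, e = start, start + length - 1
--     if s > e or s > CAP:
--         return 0
--     gaps = []
--     while True:
--         ns, ne = s + length, e + length - 1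
--         if e > CAP or ns > ne or ns > CAP:
--             break
--         if e + 1 <= ns - 1:
--             gaps.append((e + 1, ns - 1))
--         s, e = ns, ne
--     checksum = _xor_range(start, min(e, CAP))
--     for ga, gb in gaps:
--         checksum ^= _xor_range(ga, gb)
--     return checksum
-- ===== Notes on version B (the rewrite author's own statement) =====
-- stated objective: alternative
-- what changed: Drops A's number-theoretic prefix-XOR helper entirely: B first records the gaps between consecutive staircase rows, then XORs the whole contiguous hull [start, hull_end] once and cancels each gap back out via x^x=0, computing each range-XOR by pairing aligned ids (2k,2k+1) -> 1 instead of a prefix formula.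
import Mathlib
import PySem

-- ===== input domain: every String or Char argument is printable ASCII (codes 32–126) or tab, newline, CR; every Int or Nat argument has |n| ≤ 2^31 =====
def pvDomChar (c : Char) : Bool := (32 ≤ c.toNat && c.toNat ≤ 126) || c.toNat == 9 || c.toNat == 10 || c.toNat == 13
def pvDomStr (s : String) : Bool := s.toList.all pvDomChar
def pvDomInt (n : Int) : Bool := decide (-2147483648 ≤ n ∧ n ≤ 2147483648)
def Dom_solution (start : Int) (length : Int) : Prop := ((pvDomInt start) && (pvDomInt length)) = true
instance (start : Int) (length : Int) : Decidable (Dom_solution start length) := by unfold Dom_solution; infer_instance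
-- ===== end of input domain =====

-- B drops A's prefix-XOR helper: it XORs the whole contiguous hull once and cancels
-- the gaps between rows back out, pairing aligned ids for each range (objective: alternative).

-- ===== PORT A =====
-- helper get_xor_from_0: prefix XOR of [0, n] via if-chain on n % 4
def solGetXor (n : Int) : Int :=
  let rem := PySem.Int.mod n 4
  if rem = 0 then n
  else if rem = 1 then 1
  else if rem = 2 then n + 1
  else 0

-- the while-loop: mutable s, end_of_inspection, check_sum
def solLoopA (length : Int) (s e cs : Int) : Int :=
  if h : s ≤ e then
    if s > 2000000000 then cs
    else if e ≤ 2000000000 then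
      solLoopA length (s + length) (e + (length - 1))
        (PySem.Int.bxor cs (PySem.Int.bxor (solGetXor (s - 1)) (solGetXor e)))
    else PySem.Int.bxor cs (PySem.Int.bxor (solGetXor (s - 1)) (solGetXor 2000000000))
  else cs
termination_by (e - s + 1).toNat
decreasing_by omega

def solution (start : Int) (length : Int) : Int :=
  solLoopA length start (start + length - 1) 0

-- ===== PORT B =====
-- _xor_range(a, b): XOR of the ids a..b by cancelling aligned pairs (2k, 2k+1) to 1
def pairXor (a b : Int) : Int :=
  let acc : Int := 0
  let p := if PySem.Int.mod a 2 = 1 then (PySem.Int.bxor acc a, a + 1) else (acc, a)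
  let q := if PySem.Int.mod b 2 = 0 then (PySem.Int.bxor p.1 b, b - 1) else (p.1, b)
  if p.2 ≤ q.2 ∧ PySem.Int.mod (PySem.Int.floordiv (q.2 + 1 - p.2) 2) 2 = 1 then
    PySem.Int.bxor q.1 1
  else q.1

-- the while-loop of B: collect the gaps between consecutive rows; returns (gaps, final e)
def solGaps (length s e : Int) : List (Int × Int) × Int :=
  if h : e > 2000000000 ∨ s + length > e + (length - 1) ∨ s + length > 2000000000 then
    ([], e)
  else
    let r := solGaps length (s + length) (e + (length - 1))
    (if e + 1 ≤ s + length - 1 then (e + 1, s + length - 1) :: r.1 else r.1, r.2)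
termination_by (e - s).toNat
decreasing_by simp only [not_or, not_lt] at h; omega

def solution_alt (start : Int) (length : Int) : Int :=
  let s := start
  let e := start + length - 1
  if s > e ∨ s > 2000000000 then 0
  else
    let r := solGaps length s e
    r.1.foldl (fun cs g => PySem.Int.bxor cs (pairXor g.1 g.2))
      (pairXor start (min r.2 2000000000))

-- ===== PRECONDITION & SPEC =====
def Spec_solution (start : Int) (length : Int) (out : Int) : Prop := out = solution_alt start length
instance (start : Int) (length : Int) (out : Int) : Decidable (Spec_solution start length out) := by unfold Spec_solution; infer_instance

-- ===== CLAIM (what is proved, stated in full; the proofs are below) =====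
def Claim_equal_solution : Prop := ∀ (start : Int) (length : Int), Dom_solution start length → Spec_solution start length (solution start length)

-- ===== LEMMAS AND PROOFS =====

-- Nat-level: XOR with 1 flips the last bit
lemma natXor_even_one (k : Nat) : (2 * k) ^^^ 1 = 2 * k + 1 := by
  apply Nat.eq_of_testBit_eq
  intro i
  cases i with
  | zero =>
      rw [Nat.testBit_xor, Nat.testBit_zero, Nat.testBit_zero, Nat.testBit_zero]
      have e1 : 2 * k % 2 = 0 := by omega
      have e2 : (2 * k + 1) % 2 = 1 := by omega
      rw [e1, e2]; decide
  | succ i =>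
      rw [Nat.testBit_xor, Nat.testBit_succ, Nat.testBit_succ, Nat.testBit_succ]
      have h1 : 2 * k / 2 = k := by omega
      have h2 : (2 * k + 1) / 2 = k := by omega
      have h3 : 1 / 2 = 0 := by omega
      rw [h1, h2, h3, Nat.zero_testBit, Bool.xor_false]

lemma natXor_odd_one (k : Nat) : (2 * k + 1) ^^^ 1 = 2 * k := by
  apply Nat.eq_of_testBit_eq
  intro i
  cases i with
  | zero =>
      rw [Nat.testBit_xor, Nat.testBit_zero, Nat.testBit_zero, Nat.testBit_zero]
      have e1 : 2 * k % 2 = 0 := by omega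
      have e2 : (2 * k + 1) % 2 = 1 := by omega
      rw [e2, e1]; decide
  | succ i =>
      rw [Nat.testBit_xor, Nat.testBit_succ, Nat.testBit_succ, Nat.testBit_succ]
      have h1 : 2 * k / 2 = k := by omega
      have h2 : (2 * k + 1) / 2 = k := by omega
      have h3 : 1 / 2 = 0 := by omega
      rw [h1, h2, h3, Nat.zero_testBit, Bool.xor_false]

-- parts view of PySem.Int.bxor: sign bit and magnitude bits
def bParts (sgn : Bool) (m : Nat) : Int := if sgn then -(m : Int) - 1 else (m : Int)

def bN (a : Int) : Nat := if 0 ≤ a then a.toNat else (-a - 1).toNat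

lemma bxor_parts (a b : Int) :
    PySem.Int.bxor a b = bParts (xor (decide (a < 0)) (decide (b < 0))) (bN a ^^^ bN b) := by
  unfold PySem.Int.bxor bParts bN
  by_cases ha : 0 ≤ a <;> by_cases hb : 0 ≤ b <;>
    simp [ha, hb, show ¬ (a < 0) ↔ 0 ≤ a by omega, show ¬ (b < 0) ↔ 0 ≤ b by omega] <;>
    omega

lemma bParts_neg_lt (sgn : Bool) (m : Nat) : bParts sgn m < 0 ↔ sgn = true := by
  unfold bParts; cases sgn <;> simp <;> omega

lemma bN_bParts (sgn : Bool) (m : Nat) : bN (bParts sgn m) = m := by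
  unfold bN bParts; cases sgn <;> simp <;> omega

lemma bxor_assoc (a b c : Int) :
    PySem.Int.bxor (PySem.Int.bxor a b) c = PySem.Int.bxor a (PySem.Int.bxor b c) := by
  rw [bxor_parts a b, bxor_parts b c, bxor_parts (bParts _ _) c, bxor_parts a (bParts _ _)]
  rw [bN_bParts, bN_bParts]
  have h1 : ∀ (s : Bool) (m : Nat), decide (bParts s m < 0) = s := by
    intro s m
    cases s
    · simp [bParts_neg_lt]
    · simp [bParts_neg_lt]
  rw [h1, h1]
  rw [Nat.xor_assoc, Bool.xor_assoc]

lemma bxor_zero_left (a : Int) : PySem.Int.bxor 0 a = a := by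
  rw [PySem.Int.bxor_comm, PySem.Int.bxor_zero]

lemma bxor_left_comm (a b c : Int) :
    PySem.Int.bxor a (PySem.Int.bxor b c) = PySem.Int.bxor b (PySem.Int.bxor a c) := by
  rw [← bxor_assoc, PySem.Int.bxor_comm a b, bxor_assoc]

lemma bxor_cancel_left (a b : Int) : PySem.Int.bxor a (PySem.Int.bxor a b) = b := by
  rw [← bxor_assoc, PySem.Int.bxor_self, bxor_zero_left]

-- even a → a ^ 1 = a + 1
lemma bxor_even_one (a : Int) (h : a % 2 = 0) : PySem.Int.bxor a 1 = a + 1 := by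
  rw [bxor_parts]
  by_cases ha : 0 ≤ a
  · obtain ⟨k, hk⟩ : ∃ k, a.toNat = 2 * k := ⟨a.toNat / 2, by omega⟩
    have hb : bN a = 2 * k := by unfold bN; simp [ha, hk]
    have h1 : bN 1 = 1 := by decide
    rw [hb, h1, natXor_even_one]
    simp [show ¬ (a < 0) by omega, bParts]
    omega
  · obtain ⟨k, hk⟩ : ∃ k, (-a - 1).toNat = 2 * k + 1 := ⟨(-a - 1).toNat / 2, by omega⟩
    have hb : bN a = 2 * k + 1 := by unfold bN; simp [ha, hk]
    have h1 : bN 1 = 1 := by decide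
    rw [hb, h1, natXor_odd_one]
    simp [show a < 0 by omega, bParts]
    omega

lemma bxor_even_succ (a : Int) (h : a % 2 = 0) : PySem.Int.bxor a (a + 1) = 1 := by
  rw [← bxor_even_one a h, ← bxor_assoc, PySem.Int.bxor_self, bxor_zero_left]

-- recurrence of A's prefix helper: f n = f (n-1) ^ n
lemma getXor_rec (n : Int) : solGetXor n = PySem.Int.bxor (solGetXor (n - 1)) n := by
  simp only [solGetXor, PySem.Int.mod_eq_emod_of_pos (show (0:Int) < 4 by norm_num)]
  have h4 : n % 4 = 0 ∨ n % 4 = 1 ∨ n % 4 = 2 ∨ n % 4 = 3 := by omega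
  rcases h4 with h | h | h | h
  · rw [if_pos h, if_neg (show ¬ (n - 1) % 4 = 0 by omega), if_neg (show ¬ (n - 1) % 4 = 1 by omega),
      if_neg (show ¬ (n - 1) % 4 = 2 by omega), bxor_zero_left]
  · rw [if_neg (show ¬ n % 4 = 0 by omega), if_pos h, if_pos (show (n - 1) % 4 = 0 by omega)]
    have he := bxor_even_succ (n - 1) (by omega)
    rw [show n - 1 + 1 = n by ring] at he
    rw [he]
  · rw [if_neg (show ¬ n % 4 = 0 by omega), if_neg (show ¬ n % 4 = 1 by omega), if_pos h,
      if_neg (show ¬ (n - 1) % 4 = 0 by omega), if_pos (show (n - 1) % 4 = 1 by omega)]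
    rw [PySem.Int.bxor_comm, bxor_even_one n (by omega)]
  · rw [if_neg (show ¬ n % 4 = 0 by omega), if_neg (show ¬ n % 4 = 1 by omega),
      if_neg (show ¬ n % 4 = 2 by omega), if_neg (show ¬ (n - 1) % 4 = 0 by omega),
      if_neg (show ¬ (n - 1) % 4 = 1 by omega), if_pos (show (n - 1) % 4 = 2 by omega)]
    rw [show n - 1 + 1 = n by ring, PySem.Int.bxor_self]

-- the value of B's _xor_range after its first (start-alignment) adjustment
def pxB (acc a b : Int) : Int :=
  if b % 2 = 0 then
    if a ≤ b - 1 ∧ (b - 1 + 1 - a) / 2 % 2 = 1 then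
      PySem.Int.bxor (PySem.Int.bxor acc b) 1
    else PySem.Int.bxor acc b
  else
    if a ≤ b ∧ (b + 1 - a) / 2 % 2 = 1 then PySem.Int.bxor acc 1 else acc

lemma pairXor_even (a b : Int) (ha : a % 2 = 0) : pairXor a b = pxB 0 a b := by
  simp only [pairXor, pxB, PySem.Int.mod_eq_emod_of_pos (show (0:Int) < 2 by norm_num),
    PySem.Int.floordiv_eq_ediv_of_pos (show (0:Int) < 2 by norm_num),
    if_neg (show ¬ a % 2 = 1 by omega)]
  by_cases hb : b % 2 = 0
  · rw [if_pos hb, if_pos hb]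
  · rw [if_neg hb, if_neg hb]

lemma pairXor_odd (a b : Int) (ha : a % 2 = 1) :
    pairXor a b = pxB (PySem.Int.bxor 0 a) (a + 1) b := by
  simp only [pairXor, pxB, PySem.Int.mod_eq_emod_of_pos (show (0:Int) < 2 by norm_num),
    PySem.Int.floordiv_eq_ediv_of_pos (show (0:Int) < 2 by norm_num), if_pos ha]
  by_cases hb : b % 2 = 0
  · rw [if_pos hb, if_pos hb]
  · rw [if_neg hb, if_neg hb]

lemma pxB_refl (acc a : Int) (ha : a % 2 = 0) : pxB acc a a = PySem.Int.bxor acc a := by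
  unfold pxB
  rw [if_pos ha, if_neg (by omega)]

lemma pxB_refl_odd (acc a : Int) (ha : a % 2 = 1) : pxB acc (a + 1) a = acc := by
  unfold pxB
  rw [if_neg (by omega), if_neg (by omega)]

lemma pairXor_refl (a : Int) : pairXor a a = a := by
  by_cases ha : a % 2 = 0
  · rw [pairXor_even a a ha, pxB_refl 0 a ha, bxor_zero_left]
  · rw [pairXor_odd a a (by omega), pxB_refl_odd _ a (by omega), bxor_zero_left]

lemma pxB_step (acc a b : Int) (ha : a % 2 = 0) (hle : a ≤ b + 1) :
    pxB acc a (b + 1) = PySem.Int.bxor (pxB acc a b) (b + 1) := by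
  unfold pxB
  by_cases hb : b % 2 = 0
  · -- b even, b + 1 odd
    rw [if_neg (by omega : ¬ (b + 1) % 2 = 0), if_pos hb]
    have hab : a ≤ b := by omega
    by_cases hd0 : a = b
    · rw [if_pos ⟨by omega, by omega⟩, if_neg (by omega)]
      rw [bxor_assoc, bxor_even_succ b hb]
    · have hab2 : a ≤ b - 2 := by omega
      by_cases ho : (b - 1 + 1 - a) / 2 % 2 = 1
      · rw [if_neg (by omega), if_pos ⟨by omega, ho⟩]
        rw [bxor_assoc, bxor_assoc, bxor_left_comm b 1, bxor_even_succ b hb,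
          PySem.Int.bxor_self, PySem.Int.bxor_zero]
      · rw [if_pos ⟨by omega, by omega⟩, if_neg (fun hc => ho hc.2)]
        rw [bxor_assoc, bxor_even_succ b hb]
  · -- b odd, b + 1 even
    rw [if_pos (by omega : (b + 1) % 2 = 0), if_neg hb]
    by_cases hc : a ≤ b ∧ (b + 1 - a) / 2 % 2 = 1
    · rw [if_pos (show a ≤ b + 1 - 1 ∧ (b + 1 - 1 + 1 - a) / 2 % 2 = 1 by
        constructor
        · omega
        · omega), if_pos hc]
      rw [bxor_assoc, bxor_assoc, PySem.Int.bxor_comm (b + 1) 1]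
    · rw [if_neg (fun hc2 => hc ⟨by omega, by omega⟩), if_neg hc]

lemma pairXor_step (a b : Int) (hab : a ≤ b) :
    pairXor a (b + 1) = PySem.Int.bxor (pairXor a b) (b + 1) := by
  by_cases ha : a % 2 = 0
  · rw [pairXor_even a _ ha, pairXor_even a b ha, pxB_step _ _ _ ha (by omega)]
  · rw [pairXor_odd a _ (by omega), pairXor_odd a b (by omega),
      pxB_step _ _ _ (by omega) (by omega)]

lemma pairXor_eq (a b : Int) (hab : a ≤ b) :
    pairXor a b = PySem.Int.bxor (solGetXor (a - 1)) (solGetXor b) := by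
  obtain ⟨d, hd⟩ := Int.le.dest hab
  subst hd
  induction d with
  | zero =>
      simp only [Nat.cast_zero, add_zero]
      rw [pairXor_refl, getXor_rec a, bxor_cancel_left]
  | succ d ih =>
      have h1 : a + ((d : Nat) + 1 : Nat) = (a + d) + 1 := by push_cast; ring
      rw [h1, pairXor_step a (a + d) (by omega), ih (by omega), bxor_assoc]
      have hr := getXor_rec (a + d + 1)
      rw [show a + (d : Int) + 1 - 1 = a + d by ring] at hr
      rw [← hr]

-- pull the fold's initial accumulator out front
lemma foldl_bxor_init (l : List (Int × Int)) (i : Int) :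
    l.foldl (fun cs g => PySem.Int.bxor cs (pairXor g.1 g.2)) i =
      PySem.Int.bxor i (l.foldl (fun cs g => PySem.Int.bxor cs (pairXor g.1 g.2)) 0) := by
  induction l generalizing i with
  | nil => simp [PySem.Int.bxor_zero]
  | cons x l ih =>
      simp only [List.foldl_cons]
      rw [ih, ih (PySem.Int.bxor 0 (pairXor x.1 x.2)), bxor_zero_left, ← bxor_assoc]

-- the final e of B's gap loop stays at or above s
lemma solGaps_snd_ge (length : Int) : ∀ (n : Nat) (s e : Int), (e - s).toNat = n → s ≤ e →
    e ≤ s + length - 1 → s ≤ (solGaps length s e).2 := by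
  intro n
  induction n with
  | zero =>
      intro s e hn hse hlen
      rw [solGaps]
      split
      · exact hse
      · next h => simp only [not_or, not_lt] at h; omega
  | succ n ih =>
      intro s e hn hse hlen
      rw [solGaps]
      split
      · exact hse
      · next h =>
          simp only [not_or, not_lt] at h
          have := ih (s + length) (e + (length - 1)) (by omega) (by omega) (by omega)
          simp only []
          omega

-- A's loop equals: cs ^ f(s-1) ^ f(min e_final CAP) ^ (xor of the recorded gaps)
lemma loop_eq (length : Int) : ∀ (n : Nat) (s e cs : Int), (e - s).toNat = n →
    s ≤ e → s ≤ 2000000000 → e ≤ s + length - 1 →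
    solLoopA length s e cs =
      PySem.Int.bxor cs (PySem.Int.bxor (solGetXor (s - 1))
        (PySem.Int.bxor (solGetXor (min (solGaps length s e).2 2000000000))
          ((solGaps length s e).1.foldl (fun cs g => PySem.Int.bxor cs (pairXor g.1 g.2)) 0))) := by
  intro n
  induction n with
  | zero =>
      intro s e cs hn hse hcap hlen
      have hes : e = s := by omega
      rw [solGaps, dif_pos (by omega)]
      rw [solLoopA, dif_pos hse, if_neg (by omega), if_pos (by omega),
        solLoopA, dif_neg (by omega)]
      simp only [List.foldl_nil]
      rw [PySem.Int.bxor_zero, min_eq_left (by omega)]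
  | succ n ih =>
      intro s e cs hn hse hcap hlen
      by_cases hbrk : e > 2000000000 ∨ s + length > e + (length - 1) ∨ s + length > 2000000000
      · rw [solGaps, dif_pos hbrk]
        simp only [List.foldl_nil]
        rw [PySem.Int.bxor_zero]
        rw [solLoopA, dif_pos hse, if_neg (by omega)]
        by_cases he : e ≤ 2000000000
        · rw [if_pos he]
          have hstop : solLoopA length (s + length) (e + (length - 1))
              (PySem.Int.bxor cs (PySem.Int.bxor (solGetXor (s - 1)) (solGetXor e))) =
              PySem.Int.bxor cs (PySem.Int.bxor (solGetXor (s - 1)) (solGetXor e)) := by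
            rw [solLoopA]
            split_ifs with h1 h2 h3
            · rfl
            · omega
            · omega
            · rfl
          rw [hstop, min_eq_left he]
        · rw [if_neg he, min_eq_right (by omega)]
      · simp only [not_or, not_lt] at hbrk
        obtain ⟨hbe, hbns, hbcap⟩ := hbrk
        rw [solGaps, dif_neg (by omega)]
        simp only []
        rw [solLoopA, dif_pos hse, if_neg (by omega), if_pos (by omega : e ≤ 2000000000)]
        rw [ih (s + length) (e + (length - 1))
          (PySem.Int.bxor cs (PySem.Int.bxor (solGetXor (s - 1)) (solGetXor e)))
          (by omega) (by omega) (by omega) (by omega)]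
        by_cases hg : e + 1 ≤ s + length - 1
        · rw [if_pos hg]
          simp only [List.foldl_cons]
          rw [foldl_bxor_init _ (PySem.Int.bxor 0 (pairXor (e + 1) (s + length - 1))),
            bxor_zero_left]
          have hpe := pairXor_eq (e + 1) (s + length - 1) hg
          rw [show e + 1 - 1 = e by ring] at hpe
          rw [hpe]
          -- pure xor-algebra: both sides carry {cs, f(s-1), f(e), f(s+length-1), f(min), G}
          simp [bxor_assoc, bxor_left_comm, PySem.Int.bxor_comm]
        · rw [if_neg hg]
          have hesl : e = s + length - 1 := by omega
          subst hesl
          -- f(e) = f(s+length-1) cancels against the next row's f(ns - 1)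
          simp [bxor_assoc, bxor_left_comm, bxor_cancel_left]

-- ===== VERDICT (by name: the statement is the Claim_ definition above) =====
theorem solution_spec : Claim_equal_solution := by
  intro start length _
  unfold Spec_solution solution
  simp only [solution_alt]
  by_cases h1 : start > start + length - 1
  · rw [solLoopA, dif_neg (by omega), if_pos (Or.inl h1)]
  · by_cases h2 : start > 2000000000
    · rw [solLoopA, dif_pos (by omega), if_pos h2, if_pos (Or.inr h2)]
    · rw [if_neg (show ¬ (start > start + length - 1 ∨ start > 2000000000) by omega)]
      rw [loop_eq length (start + length - 1 - start).toNat start (start + length - 1) 0 rfl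
        (by omega) (by omega) (by omega)]
      rw [bxor_zero_left,
        foldl_bxor_init _ (pairXor start (min (solGaps length start (start + length - 1)).2 2000000000))]
      have hge := solGaps_snd_ge length (start + length - 1 - start).toNat start
        (start + length - 1) rfl (by omega) (by omega)
      rw [pairXor_eq start (min (solGaps length start (start + length - 1)).2 2000000000) (by omega)]
      simp [bxor_assoc]
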